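-- pv_equiv track=rewrite | github.com/nakasota/TLR-Replication_C_Type_exp2 | src/directory_and_file_level_localization/create_simplified_repo_structure.py | _split_lines_with_context
-- ===== SOURCE A (Python) =====
-- def _line_indent_level(line):
--     return (len(line) - len(line.lstrip(" "))) // 4
--
-- def _compute_context_stacks(lines):
--     stacks = []
--     current = []
--     for line in lines:
--         indent_level = _line_indent_level(line)
--         current = current[:indent_level]
--         stacks.append(list(current))
--         if line.rstrip().endswith("/"):
--             current = current + [line.strip().rstrip("/")]
--     return stacks
--
-- def _context_lines_from_stack(stack):
--     return [("    " * idx) + f"{name}/" for idx, name in enumerate(stack)]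
--
-- def _split_lines_with_context(lines, max_lines):
--     stacks = _compute_context_stacks(lines)
--     chunks = []
--     index = 0
--     while index < len(lines):
--         context = _context_lines_from_stack(stacks[index])
--         available = max_lines - len(context)
--         if available <= 0:
--             context = []
--             available = max_lines
--         chunk_lines = context + lines[index:index + available]
--         chunks.append(chunk_lines)
--         index += available
--     return chunks
-- ===== SOURCE B (Python) =====
-- def _split_lines_with_context(lines, max_lines):
--     def indent(line):
--         return (len(line) - len(line.lstrip(" "))) // 4
--
--     chunks = []
--     current = []
--     rest = lines
--     while rest:
--         current = current[:indent(rest[0])]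
--         context = ["    " * i + name + "/" for i, name in enumerate(current)]
--         available = max_lines - len(context)
--         if available <= 0:
--             context = []
--             available = max_lines
--         body, rest = rest[:available], rest[available:]
--         for line in body:
--             current = current[:indent(line)]
--             if line.rstrip().endswith("/"):
--                 current = current + [line.strip().rstrip("/")]
--         chunks.append(context + body)
--     return chunks
-- ===== Notes on version B (the rewrite author's own statement) =====
-- stated objective: simpler
-- what changed: B drops the _compute_context_stacks precompute (which builds a stack copy for every line) and instead keeps one running indentation stack, advancing it only over the lines each chunk actually consumes while walking the remaining-lines list directly.
import Mathlib
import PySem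

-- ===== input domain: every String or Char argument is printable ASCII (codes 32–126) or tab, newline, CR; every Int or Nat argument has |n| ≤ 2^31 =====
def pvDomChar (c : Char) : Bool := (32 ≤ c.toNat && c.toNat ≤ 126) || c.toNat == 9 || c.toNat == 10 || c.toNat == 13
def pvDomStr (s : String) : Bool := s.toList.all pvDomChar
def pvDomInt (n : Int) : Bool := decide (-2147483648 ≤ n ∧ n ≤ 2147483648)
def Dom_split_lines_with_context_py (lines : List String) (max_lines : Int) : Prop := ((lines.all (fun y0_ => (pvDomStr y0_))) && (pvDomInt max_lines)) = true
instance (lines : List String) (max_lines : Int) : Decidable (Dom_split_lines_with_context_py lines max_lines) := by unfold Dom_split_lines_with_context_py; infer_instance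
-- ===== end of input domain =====

-- B fuses the per-line context-stack precompute into the split loop, keeping one running
-- indentation stack while walking the remaining-lines list directly (objective: simpler).


-- ===== PORT A =====
-- _line_indent_level: (len(line) - len(line.lstrip(" "))) // 4
-- line.lstrip(" ") strips only spaces: ported by hand as dropWhile (· == ' '), exact.
def pvIndentA (line : String) : Int :=
  PySem.Int.floordiv (PySem.Str.len line - PySem.Chars.len (line.toList.dropWhile (fun c => c == ' '))) 4

-- line.rstrip().endswith("/")
def pvEndsSlashA (line : String) : Bool :=
  PySem.Str.endswith (PySem.Str.rstrip line) "/"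

-- line.strip().rstrip("/"): rstrip with an explicit char set is ported by hand as
-- dropping trailing '/' characters (reverse, dropWhile, reverse), exact.
def pvNameA (line : String) : String :=
  String.ofList (((PySem.Str.strip line).toList.reverse.dropWhile (fun c => c == '/')).reverse)

-- the loop of _compute_context_stacks
def pvStacksGoA : List String → List String → List (List String)
  | [], _ => []
  | line :: rest, current =>
    let current' := PySem.List.slice current none (some (pvIndentA line))
    current' :: pvStacksGoA rest
      (if pvEndsSlashA line then current' ++ [pvNameA line] else current')

def pvComputeContextStacksA (lines : List String) : List (List String) :=
  pvStacksGoA lines []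

-- _context_lines_from_stack: [("    " * idx) + f"{name}/" for idx, name in enumerate(stack)]
def pvContextFromStackA (stack : List String) : List String :=
  (PySem.List.enumerate stack).map
    (fun p => String.ofList (List.replicate (4 * p.1.toNat) ' ' ++ p.2.toList ++ ['/']))

-- the while-loop of _split_lines_with_context, index-based; the 'ca.2.toNat = 0' branch is
-- only a termination guard (there Python's A diverges; such inputs are excluded by Pre_).
def pvSplitGoA (lines : List String) (stks : List (List String)) (max_lines : Int)
    (index : Nat) : List (List String) :=
  if h : index < lines.length then
    let context := pvContextFromStackA (PySem.List.pyGetD stks (index : Int) [])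
    let available := max_lines - (context.length : Int)
    let ca := if available ≤ 0 then (([] : List String), max_lines) else (context, available)
    let chunk := ca.1 ++ PySem.List.slice lines (some (index : Int)) (some ((index : Int) + ca.2))
    if h2 : ca.2.toNat = 0 then [chunk]
    else chunk :: pvSplitGoA lines stks max_lines (index + ca.2.toNat)
  else []
termination_by lines.length - index
decreasing_by exact Nat.sub_lt_sub_left h (Nat.lt_add_of_pos_right (Nat.pos_of_ne_zero h2))

def split_lines_with_context_py (lines : List String) (max_lines : Int) : List (List String) :=
  pvSplitGoA lines (pvComputeContextStacksA lines) max_lines 0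

-- ===== PORT B =====
-- B's local helper indent(line) (same formula as A's module-level helper)
def pvIndentB (line : String) : Int :=
  PySem.Int.floordiv (PySem.Str.len line - PySem.Chars.len (line.toList.dropWhile (fun c => c == ' '))) 4

def pvEndsSlashB (line : String) : Bool :=
  PySem.Str.endswith (PySem.Str.rstrip line) "/"

def pvNameB (line : String) : String :=
  String.ofList (((PySem.Str.strip line).toList.reverse.dropWhile (fun c => c == '/')).reverse)

-- the body of B's inner 'for line in body' loop
def pvStepB (current : List String) (line : String) : List String :=
  let current' := PySem.List.slice current none (some (pvIndentB line))
  if pvEndsSlashB line then current' ++ [pvNameB line] else current'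

-- B's while-loop over the remaining list 'rest' with the running stack 'current'; the
-- non-shrinking branch is only a termination guard (there Python diverges; excluded by Pre_).
def pvSplitGoB (max_lines : Int) (rest current : List String) : List (List String) :=
  match rest with
  | [] => []
  | line :: more =>
    let current1 := PySem.List.slice current none (some (pvIndentB line))
    let context := (PySem.List.enumerate current1).map
      (fun p => String.ofList (List.replicate (4 * p.1.toNat) ' ' ++ p.2.toList ++ ['/']))
    let available := max_lines - (context.length : Int)
    let ca := if available ≤ 0 then (([] : List String), max_lines) else (context, available)
    let body := PySem.List.slice (line :: more) none (some ca.2)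
    let rest' := PySem.List.slice (line :: more) (some ca.2) none
    let current2 := body.foldl pvStepB current1
    if h : rest'.length < more.length + 1 then
      (ca.1 ++ body) :: pvSplitGoB max_lines rest' current2
    else [ca.1 ++ body]
termination_by rest.length
decreasing_by exact h

def split_lines_with_context_py_alt (lines : List String) (max_lines : Int) : List (List String) :=
  pvSplitGoB max_lines lines []

-- ===== PRECONDITION & SPEC =====
-- Pre_ excludes max_lines ≤ 0 with a nonempty input, on which Python's A never terminates
-- (index advances by at most 0 each iteration).
def Pre_split_lines_with_context_py (lines : List String) (max_lines : Int) : Prop :=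
  lines = [] ∨ 1 ≤ max_lines
instance (lines : List String) (max_lines : Int) : Decidable (Pre_split_lines_with_context_py lines max_lines) := by unfold Pre_split_lines_with_context_py; infer_instance

def pvWitness_split_lines_with_context_py : List String × Int :=
  (["pkg/", "    mod.py", "    sub/", "        a.py"], 2)

def Spec_split_lines_with_context_py (lines : List String) (max_lines : Int) (out : List (List String)) : Prop := out = split_lines_with_context_py_alt lines max_lines
instance (lines : List String) (max_lines : Int) (out : List (List String)) : Decidable (Spec_split_lines_with_context_py lines max_lines out) := by unfold Spec_split_lines_with_context_py; infer_instance

-- ===== CLAIM (what is proved, stated in full; the proofs are below) =====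
def Claim_equal_split_lines_with_context_py : Prop := ∀ (lines : List String) (max_lines : Int), Dom_split_lines_with_context_py lines max_lines → Pre_split_lines_with_context_py lines max_lines → Spec_split_lines_with_context_py lines max_lines (split_lines_with_context_py lines max_lines)

-- ===== LEMMAS AND PROOFS =====

theorem pvIndentB_eq : pvIndentB = pvIndentA := rfl

-- A's per-line stack step, the same shape as pvStepB
def pvStepA (current : List String) (line : String) : List String :=
  let current' := PySem.List.slice current none (some (pvIndentA line))
  if pvEndsSlashA line then current' ++ [pvNameA line] else current'

theorem pvStepB_eq : pvStepB = pvStepA := rfl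

theorem pvIndentA_nonneg (line : String) : 0 ≤ pvIndentA line := by
  unfold pvIndentA
  have h : (line.toList.dropWhile (fun c => c == ' ')).length ≤ line.toList.length :=
    List.length_dropWhile_le _ _
  have h0 : (0:Int) ≤ PySem.Str.len line - PySem.Chars.len (line.toList.dropWhile (fun c => c == ' ')) := by
    simp only [PySem.Str.len_eq, PySem.Chars.len_eq, sub_nonneg]
    exact_mod_cast h
  rw [PySem.Int.floordiv_eq_ediv_of_pos (by norm_num)]
  exact Int.ediv_nonneg h0 (by norm_num)

theorem slice_indentA (cur : List String) (line : String) :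
    PySem.List.slice cur none (some (pvIndentA line)) = cur.take (pvIndentA line).toNat :=
  PySem.List.slice_to cur (pvIndentA_nonneg line)

theorem truncA_idem (cur : List String) (line : String) :
    PySem.List.slice (PySem.List.slice cur none (some (pvIndentA line))) none (some (pvIndentA line))
      = PySem.List.slice cur none (some (pvIndentA line)) := by
  simp [slice_indentA, List.take_take]

-- characterisation of A's precomputed stacks: entry i is the fold of pvStepA over the
-- first i lines, truncated by line i's indent
theorem pvStacksGoA_getElem? (ls : List String) (cur : List String) (i : Nat)
    (hi : i < ls.length) :
    (pvStacksGoA ls cur)[i]? =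
      some (PySem.List.slice ((ls.take i).foldl pvStepA cur) none (some (pvIndentA ls[i]))) := by
  induction ls generalizing cur i with
  | nil => simp at hi
  | cons l t ih =>
    cases i with
    | zero => simp [pvStacksGoA]
    | succ j =>
      have hj : j < t.length := by simpa using hi
      simp [pvStacksGoA, ih _ j hj, pvStepA]

-- body-fold agreement: B folds the step from the already-truncated stack over the chunk
-- body, A folds it from the untruncated one; truncation by the head line is idempotent
theorem foldl_stepA_trunc (t : List String) (cur : List String) (l : String) :
    (l :: t).foldl pvStepA (PySem.List.slice cur none (some (pvIndentA l)))
      = (l :: t).foldl pvStepA cur := by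
  have hhead : pvStepA (PySem.List.slice cur none (some (pvIndentA l))) l = pvStepA cur l := by
    simp only [pvStepA, truncA_idem]
  rw [List.foldl_cons, List.foldl_cons, hhead]

-- the main loop correspondence
theorem pvSplitGo_agree (lines : List String) (max_lines : Int) (hml : 1 ≤ max_lines) :
    ∀ (index : Nat),
      pvSplitGoA lines (pvComputeContextStacksA lines) max_lines index
        = pvSplitGoB max_lines (lines.drop index) ((lines.take index).foldl pvStepA []) := by
  intro index
  induction hn : lines.length - index using Nat.strong_induction_on generalizing index with
  | _ n ih =>
  subst hn
  by_cases hlt : index < lines.length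
  · -- nonempty remainder
    obtain ⟨l, t, hdrop⟩ : ∃ l t, lines.drop index = l :: t := by
      cases hd : lines.drop index with
      | nil => exact absurd (List.drop_eq_nil_iff.mp hd) (by omega)
      | cons a b => exact ⟨a, b, rfl⟩
    have hl : lines[index] = l := by
      have h0 : (lines.drop index)[0]'(by rw [hdrop]; simp) = l := by simp [hdrop]
      rw [List.getElem_drop] at h0
      simpa using h0
    have hstack :
        PySem.List.pyGetD (pvComputeContextStacksA lines) (index : Int) []
          = PySem.List.slice ((lines.take index).foldl pvStepA []) none (some (pvIndentA l)) := by
      rw [PySem.List.pyGetD_natCast, pvComputeContextStacksA, List.getD_eq_getElem?_getD,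
        pvStacksGoA_getElem? lines [] index hlt, hl]
      rfl
    rw [pvSplitGoA.eq_def]
    rw [dif_pos hlt]
    rw [hdrop]
    rw [pvSplitGoB.eq_def]
    simp only [pvIndentB_eq, pvStepB_eq]
    simp only [hstack]
    set cur := (lines.take index).foldl pvStepA [] with hcur
    set cur1 := PySem.List.slice cur none (some (pvIndentA l)) with hcur1
    have hctx : pvContextFromStackA cur1
        = (PySem.List.enumerate cur1).map
            (fun p => String.ofList (List.replicate (4 * p.1.toNat) ' ' ++ p.2.toList ++ ['/'])) := rfl
    rw [hctx]
    set context := (PySem.List.enumerate cur1).map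
      (fun p => String.ofList (List.replicate (4 * p.1.toNat) ' ' ++ p.2.toList ++ ['/'])) with hctxdef
    set available := max_lines - (context.length : Int) with hav
    set ca := if available ≤ 0 then (([] : List String), max_lines) else (context, available) with hca
    have hca_pos : 1 ≤ ca.2 := by
      rw [hca]; split
      · exact hml
      · omega
    have hbodyA :
        PySem.List.slice lines (some (index : Int)) (some ((index : Int) + ca.2))
          = (l :: t).take ca.2.toNat := by
      have h1 : ((index : Int) + ca.2).toNat = index + ca.2.toNat := by omega
      rw [PySem.List.slice_toNat lines (by omega) (by omega), h1, Int.toNat_natCast, hdrop,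
        Nat.add_sub_cancel_left]
    have hbodyB : PySem.List.slice (l :: t) none (some ca.2) = (l :: t).take ca.2.toNat :=
      PySem.List.slice_to _ (by omega)
    have hrestB : PySem.List.slice (l :: t) (some ca.2) none = (l :: t).drop ca.2.toNat :=
      PySem.List.slice_from _ (by omega)
    obtain ⟨k, hk⟩ : ∃ k, ca.2.toNat = k + 1 := ⟨ca.2.toNat - 1, by omega⟩
    have hAguard : ¬ ca.2.toNat = 0 := by omega
    have hBlen : ((l :: t).drop ca.2.toNat).length < t.length + 1 := by
      simp only [List.length_drop, List.length_cons]; omega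
    rw [hbodyA, hbodyB, hrestB, dif_neg hAguard, dif_pos hBlen]
    congr 1
    have hdrop' : (l :: t).drop ca.2.toNat = lines.drop (index + ca.2.toNat) := by
      rw [← hdrop, List.drop_drop]
    have hbody_cons : (l :: t).take ca.2.toNat = l :: t.take k := by rw [hk]; rfl
    have hfold :
        ((l :: t).take ca.2.toNat).foldl pvStepA cur1
          = (lines.take (index + ca.2.toNat)).foldl pvStepA [] := by
      rw [hbody_cons, hcur1, foldl_stepA_trunc, List.take_add, List.foldl_append, ← hcur,
        hdrop, ← hbody_cons]
    rw [hdrop', hfold]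
    exact ih (lines.length - (index + ca.2.toNat)) (by omega) (index + ca.2.toNat) rfl
  · -- index ≥ lines.length: both sides are empty
    rw [pvSplitGoA.eq_def, dif_neg hlt, List.drop_eq_nil_iff.mpr (by omega), pvSplitGoB.eq_def]

-- ===== VERDICT (by name: the statement is the Claim_ definition above) =====
theorem split_lines_with_context_py_spec : Claim_equal_split_lines_with_context_py := by
  intro lines max_lines _ hpre
  unfold Spec_split_lines_with_context_py
  rcases hpre with h | h
  · subst h
    simp [split_lines_with_context_py, split_lines_with_context_py_alt, pvSplitGoA, pvSplitGoB]
  · unfold split_lines_with_context_py split_lines_with_context_py_alt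
    simpa using pvSplitGo_agree lines max_lines h 0
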